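-- pv_equiv track=rewrite | github.com/cp4011/Algorithms | Examination/10-删除字符串中的指定字符.py | func
-- ===== SOURCE A (Python) =====
-- def func(s):
--     s = list(s)                     # 将字符串转换成list，可以使用list.pop()
--     i = 2
--     while i < len(s):               # 【此处不能使用 for循环，要删除元素，while循环】且每次循环前，都要计算是否满足条件，即len(s)的值在变化
--         if i >= 2 and s[i] == s[i-1] == s[i-2]:                 # AAA型，注意需要有 i >= 2
--             s.pop(i)                # list.pop()
--         elif i >= 3 and s[i] == s[i-1] and s[i-2] == s[i-3]:    # AABB型，注意需要有 i >= 3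
--             s.pop(i)                # s = s[:i] + s[i+1:] 将新建列表（空间）
--         else:
--             i += 1                  # 或者则 索引前移
--     return ''.join(s)               # 列表转换成字符串
-- ===== SOURCE B (Python) =====
-- def func(s):
--     out = []                        # output built once, left to right (O(n) stack)
--     for c in s:
--         if len(out) >= 2 and out[-1] == out[-2] == c:
--             continue                # would form AAA with the two kept chars
--         if len(out) >= 3 and out[-1] == c and out[-2] == out[-3]:
--             continue                # would form AABB
--         out.append(c)
--     return ''.join(out)
-- ===== Notes on version B (the rewrite author's own statement) =====
-- stated objective: faster
-- what changed: Replaced the while-loop that pops from the list in place and re-checks the same index (each pop shifting the tail) with a single left-to-right pass that appends each char to an output stack unless it would complete an AAA or AABB pattern with the last kept chars.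
import Mathlib
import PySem

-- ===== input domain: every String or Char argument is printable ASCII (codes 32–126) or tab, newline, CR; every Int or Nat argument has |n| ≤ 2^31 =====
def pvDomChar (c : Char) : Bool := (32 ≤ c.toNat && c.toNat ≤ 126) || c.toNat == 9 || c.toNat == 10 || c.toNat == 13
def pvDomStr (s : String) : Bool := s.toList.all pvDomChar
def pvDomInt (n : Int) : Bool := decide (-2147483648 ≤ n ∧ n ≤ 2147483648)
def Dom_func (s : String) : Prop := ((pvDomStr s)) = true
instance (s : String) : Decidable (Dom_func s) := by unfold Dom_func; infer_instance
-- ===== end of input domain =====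

-- B replaces A's in-place pop-and-recheck while loop by one left-to-right stack pass (faster in a timing run).

-- ===== PORT A =====
-- A's while loop: state is the mutable list s and the index i; s.pop(i) is eraseIdx
-- (the index is guarded in range, so list indexing is ported with getD).
def funcLoop (s : List Char) (i : Nat) : List Char :=
  if _h : i < s.length then
    if 2 ≤ i ∧ s.getD i ' ' = s.getD (i-1) ' ' ∧ s.getD (i-1) ' ' = s.getD (i-2) ' ' then
      funcLoop (s.eraseIdx i) i
    else if 3 ≤ i ∧ s.getD i ' ' = s.getD (i-1) ' ' ∧ s.getD (i-2) ' ' = s.getD (i-3) ' ' then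
      funcLoop (s.eraseIdx i) i
    else
      funcLoop s (i+1)
  else s
termination_by s.length - i
decreasing_by
  · have := List.length_eraseIdx_of_lt _h; omega
  · have := List.length_eraseIdx_of_lt _h; omega
  · omega

def func (s : String) : String := String.ofList (funcLoop s.toList 2)

-- ===== PORT B =====
-- Source B's single pass: `rev` is the output list `out` held in reverse
-- (out[-1] = rev.getD 0, out[-2] = rev.getD 1, out[-3] = rev.getD 2; append = cons).
def bLoop (rev : List Char) (cs : List Char) : List Char :=
  match cs with
  | [] => rev
  | c :: cs' =>
    if 2 ≤ rev.length ∧ rev.getD 0 ' ' = rev.getD 1 ' ' ∧ rev.getD 1 ' ' = c then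
      bLoop rev cs'
    else if 3 ≤ rev.length ∧ rev.getD 0 ' ' = c ∧ rev.getD 1 ' ' = rev.getD 2 ' ' then
      bLoop rev cs'
    else
      bLoop (c :: rev) cs'

def func_alt (s : String) : String := String.ofList (bLoop [] s.toList).reverse

-- ===== PRECONDITION & SPEC =====
def Spec_func (s : String) (out : String) : Prop := out = func_alt s
instance (s : String) (out : String) : Decidable (Spec_func s out) := by unfold Spec_func; infer_instance

-- ===== CLAIM (what is proved, stated in full; the proofs are below) =====
def Claim_equal_func : Prop := ∀ (s : String), Dom_func s → Spec_func s (func s)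

-- ===== LEMMAS AND PROOFS =====

-- indexing the concatenation rev.reverse ++ c :: cs at positions rev.length, rev.length-1, …
lemma getD_mid (rev cs : List Char) (c : Char) :
    (rev.reverse ++ c :: cs).getD rev.length ' ' = c := by
  simp [List.getD]

lemma getD_back (rev cs : List Char) (c : Char) (k : Nat) (hk : k < rev.length) :
    (rev.reverse ++ c :: cs).getD (rev.length - 1 - k) ' ' = rev.getD k ' ' := by
  have h1 : rev.length - 1 - k < rev.reverse.length := by simp; omega
  simp only [List.getD, List.getElem?_append_left h1]
  rw [List.getElem?_reverse (by simpa using h1)]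
  have : rev.length - 1 - (rev.length - 1 - k) = k := by omega
  rw [this]

-- erasing the element just past a prefix
lemma eraseIdx_mid (l : List Char) (c : Char) (r : List Char) :
    (l ++ c :: r).eraseIdx l.length = l ++ r := by
  induction l with
  | nil => simp
  | cons a l ih => simpa [List.eraseIdx] using ih

lemma loop_eq (cs : List Char) : ∀ (rev : List Char),
    funcLoop (rev.reverse ++ cs) rev.length = (bLoop rev cs).reverse := by
  induction cs with
  | nil =>
    intro rev
    rw [funcLoop, bLoop]
    simp
  | cons c cs' ih =>
    intro rev
    have hlt : rev.length < (rev.reverse ++ c :: cs').length := by simp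
    have herase : (rev.reverse ++ c :: cs').eraseIdx rev.length = rev.reverse ++ cs' := by
      have := eraseIdx_mid rev.reverse c cs'
      simpa using this
    have hstep : rev.reverse ++ c :: cs' = (c :: rev).reverse ++ cs' := by simp
    have histep : rev.length + 1 = (c :: rev).length := by simp
    rw [funcLoop, bLoop]
    simp only [hlt, dif_pos]
    have h0 := getD_mid rev cs' c
    by_cases h2 : 2 ≤ rev.length
    · have e1 : (rev.reverse ++ c :: cs').getD (rev.length - 1) ' ' = rev.getD 0 ' ' := by
        have := getD_back rev cs' c 0 (by omega); simpa using this
      have e2 : (rev.reverse ++ c :: cs').getD (rev.length - 2) ' ' = rev.getD 1 ' ' := by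
        have := getD_back rev cs' c 1 (by omega)
        have hx : rev.length - 1 - 1 = rev.length - 2 := by omega
        rwa [hx] at this
      by_cases hc1 : rev.getD 0 ' ' = rev.getD 1 ' ' ∧ rev.getD 1 ' ' = c
      · -- AAA branch fires on both sides
        have ha : 2 ≤ rev.length ∧
            (rev.reverse ++ c :: cs').getD rev.length ' ' =
              (rev.reverse ++ c :: cs').getD (rev.length - 1) ' ' ∧
            (rev.reverse ++ c :: cs').getD (rev.length - 1) ' ' =
              (rev.reverse ++ c :: cs').getD (rev.length - 2) ' ' := by
          rw [h0, e1, e2]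
          exact ⟨h2, (hc1.1.trans hc1.2).symm, hc1.1⟩
        rw [if_pos ha, if_pos ⟨h2, hc1⟩, herase]
        exact ih rev
      · -- AAA branch fails on both sides
        have hna : ¬(2 ≤ rev.length ∧
            (rev.reverse ++ c :: cs').getD rev.length ' ' =
              (rev.reverse ++ c :: cs').getD (rev.length - 1) ' ' ∧
            (rev.reverse ++ c :: cs').getD (rev.length - 1) ' ' =
              (rev.reverse ++ c :: cs').getD (rev.length - 2) ' ') := by
          rw [h0, e1, e2]
          rintro ⟨-, hx, hy⟩
          exact hc1 ⟨hy, hy.symm.trans hx.symm⟩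
        rw [if_neg hna, if_neg (show ¬(2 ≤ rev.length ∧ rev.getD 0 ' ' = rev.getD 1 ' ' ∧
              rev.getD 1 ' ' = c) by rintro ⟨-, hx⟩; exact hc1 hx)]
        by_cases h3 : 3 ≤ rev.length
        · have e3 : (rev.reverse ++ c :: cs').getD (rev.length - 3) ' ' = rev.getD 2 ' ' := by
            have := getD_back rev cs' c 2 (by omega)
            have hx : rev.length - 1 - 2 = rev.length - 3 := by omega
            rwa [hx] at this
          by_cases hc2 : rev.getD 0 ' ' = c ∧ rev.getD 1 ' ' = rev.getD 2 ' '
          · have hb : 3 ≤ rev.length ∧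
                (rev.reverse ++ c :: cs').getD rev.length ' ' =
                  (rev.reverse ++ c :: cs').getD (rev.length - 1) ' ' ∧
                (rev.reverse ++ c :: cs').getD (rev.length - 2) ' ' =
                  (rev.reverse ++ c :: cs').getD (rev.length - 3) ' ' := by
              rw [h0, e1, e2, e3]
              exact ⟨h3, hc2.1.symm, hc2.2⟩
            rw [if_pos hb, if_pos ⟨h3, hc2⟩, herase]
            exact ih rev
          · have hnb : ¬(3 ≤ rev.length ∧
                (rev.reverse ++ c :: cs').getD rev.length ' ' =
                  (rev.reverse ++ c :: cs').getD (rev.length - 1) ' ' ∧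
                (rev.reverse ++ c :: cs').getD (rev.length - 2) ' ' =
                  (rev.reverse ++ c :: cs').getD (rev.length - 3) ' ') := by
              rw [h0, e1, e2, e3]
              rintro ⟨-, hx, hy⟩
              exact hc2 ⟨hx.symm, hy⟩
            rw [if_neg hnb, if_neg (show ¬(3 ≤ rev.length ∧ rev.getD 0 ' ' = c ∧
                  rev.getD 1 ' ' = rev.getD 2 ' ') by rintro ⟨-, hx⟩; exact hc2 hx)]
            rw [hstep, histep]
            exact ih (c :: rev)
        · rw [if_neg (show ¬(3 ≤ rev.length ∧
                (rev.reverse ++ c :: cs').getD rev.length ' ' =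
                  (rev.reverse ++ c :: cs').getD (rev.length - 1) ' ' ∧
                (rev.reverse ++ c :: cs').getD (rev.length - 2) ' ' =
                  (rev.reverse ++ c :: cs').getD (rev.length - 3) ' ')
              by rintro ⟨hx, -⟩; exact h3 hx),
              if_neg (show ¬(3 ≤ rev.length ∧ rev.getD 0 ' ' = c ∧
                  rev.getD 1 ' ' = rev.getD 2 ' ') by rintro ⟨hx, -⟩; exact h3 hx)]
          rw [hstep, histep]
          exact ih (c :: rev)
    · -- rev shorter than 2: nothing can fire, both sides push/advance
      rw [if_neg (show ¬(2 ≤ rev.length ∧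
            (rev.reverse ++ c :: cs').getD rev.length ' ' =
              (rev.reverse ++ c :: cs').getD (rev.length - 1) ' ' ∧
            (rev.reverse ++ c :: cs').getD (rev.length - 1) ' ' =
              (rev.reverse ++ c :: cs').getD (rev.length - 2) ' ')
          by rintro ⟨hx, -⟩; exact h2 hx),
          if_neg (show ¬(3 ≤ rev.length ∧
            (rev.reverse ++ c :: cs').getD rev.length ' ' =
              (rev.reverse ++ c :: cs').getD (rev.length - 1) ' ' ∧
            (rev.reverse ++ c :: cs').getD (rev.length - 2) ' ' =
              (rev.reverse ++ c :: cs').getD (rev.length - 3) ' ')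
          by rintro ⟨hx, -⟩; omega),
          if_neg (show ¬(2 ≤ rev.length ∧ rev.getD 0 ' ' = rev.getD 1 ' ' ∧
              rev.getD 1 ' ' = c) by rintro ⟨hx, -⟩; exact h2 hx),
          if_neg (show ¬(3 ≤ rev.length ∧ rev.getD 0 ' ' = c ∧
              rev.getD 1 ' ' = rev.getD 2 ' ') by rintro ⟨hx, -⟩; omega)]
      rw [hstep, histep]
      exact ih (c :: rev)

-- the first two characters are always kept by both programs
lemma core_eq (l : List Char) : funcLoop l 2 = (bLoop [] l).reverse := by
  match l with
  | [] => rw [funcLoop, bLoop]; simp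
  | [a] => simp [funcLoop, bLoop]
  | a :: b :: t =>
    have h1 : bLoop [] (a :: b :: t) = bLoop [b, a] t := by
      rw [bLoop]; simp only [List.length_nil]
      rw [if_neg (by omega), if_neg (by omega)]
      rw [bLoop]; simp only [List.length_cons, List.length_nil]
      rw [if_neg (by omega), if_neg (by omega)]
    have h2 : a :: b :: t = ([b, a].reverse : List Char) ++ t := by simp
    rw [h1, h2]
    exact loop_eq t [b, a]

-- ===== VERDICT (by name: the statement is the Claim_ definition above) =====
theorem func_spec : Claim_equal_func := by
  intro s _
  unfold Spec_func func func_alt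
  rw [core_eq]
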